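-- pv_equiv track=rewrite | github.com/AliaumeL/polyregular-model-checking | paper/programs/between_indices.py | getBetweenIndicesBeforeStop
-- ===== SOURCE A (Python) =====
-- def getBetweenIndicesBeforeStop(l, i, j):
--     seen_stop = False
--     for (k, w) in enumerate(l):
--         if i <= k and k <= j:
--             if w == "stop":
--                 seen_stop = True
--             if not seen_stop:
--                 yield w
-- ===== SOURCE B (Python) =====
-- def getBetweenIndicesBeforeStop(l, i, j):
--     # locate-then-emit: slice out the window, cut at the first "stop", yield the prefix
--     if j < 0:
--         return
--     window = l[max(i, 0):j + 1]
--     try: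
--         end = window.index("stop")
--     except ValueError:
--         end = len(window)
--     yield from window[:end]
-- ===== Notes on version B (the rewrite author's own statement) =====
-- stated objective: alternative
-- what changed: A's stateful single scan over enumerate with a seen_stop flag is replaced by a locate-then-emit decomposition: slice the window l[max(i,0):j+1], find the first "stop" with list.index, and yield the prefix before it.
import Mathlib
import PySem

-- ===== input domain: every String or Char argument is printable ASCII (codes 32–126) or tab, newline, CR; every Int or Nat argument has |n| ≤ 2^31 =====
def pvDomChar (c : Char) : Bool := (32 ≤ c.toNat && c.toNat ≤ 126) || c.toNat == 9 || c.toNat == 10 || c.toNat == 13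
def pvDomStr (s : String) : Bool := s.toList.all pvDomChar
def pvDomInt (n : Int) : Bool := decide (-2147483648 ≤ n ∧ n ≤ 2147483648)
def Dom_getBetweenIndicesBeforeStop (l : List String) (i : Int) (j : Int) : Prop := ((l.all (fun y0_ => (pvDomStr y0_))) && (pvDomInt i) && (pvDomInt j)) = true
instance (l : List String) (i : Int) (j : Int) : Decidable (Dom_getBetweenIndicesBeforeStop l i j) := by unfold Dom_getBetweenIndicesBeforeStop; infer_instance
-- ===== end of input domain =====

-- B replaces A's single stateful scan (seen_stop flag) by slice-the-window, find the first
-- "stop", emit the prefix; same cost, different decomposition (objective: alternative).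

-- ===== PORT A =====
-- the generator's for-loop over enumerate(l), as structural recursion over the same state
-- (current index k, seen_stop flag); yields are collected into the output list
def pvAGo (i j : Int) : List String → Int → Bool → List String
  | [], _, _ => []
  | w :: t, k, seen =>
      if i ≤ k ∧ k ≤ j then
        let seen' := seen || (w == "stop")
        (if seen' then [] else [w]) ++ pvAGo i j t (k + 1) seen'
      else
        pvAGo i j t (k + 1) seen

def getBetweenIndicesBeforeStop (l : List String) (i : Int) (j : Int) : List String :=
  pvAGo i j l 0 false

-- ===== PORT B =====
def getBetweenIndicesBeforeStop_alt (l : List String) (i : Int) (j : Int) : List String :=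
  if j < 0 then []
  else
    let window := PySem.List.slice l (some (max i 0)) (some (j + 1))
    -- try: end = window.index("stop")  except ValueError: end = len(window)
    let e := (PySem.List.index? window "stop").getD window.length
    window.take e

-- ===== PRECONDITION & SPEC =====
def Spec_getBetweenIndicesBeforeStop (l : List String) (i : Int) (j : Int) (out : List String) : Prop := out = getBetweenIndicesBeforeStop_alt l i j
instance (l : List String) (i : Int) (j : Int) (out : List String) : Decidable (Spec_getBetweenIndicesBeforeStop l i j out) := by unfold Spec_getBetweenIndicesBeforeStop; infer_instance

-- ===== CLAIM (what is proved, stated in full; the proofs are below) =====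
def Claim_equal_getBetweenIndicesBeforeStop : Prop := ∀ (l : List String) (i : Int) (j : Int), Dom_getBetweenIndicesBeforeStop l i j → Spec_getBetweenIndicesBeforeStop l i j (getBetweenIndicesBeforeStop l i j)

-- ===== LEMMAS AND PROOFS =====

-- the common characterisation: the window's prefix before the first "stop"
def pvTws (xs : List String) : List String := xs.takeWhile (fun w => w != "stop")

theorem pvAGo_past (i j : Int) (l : List String) : ∀ (k : Int) (s : Bool), j < k → pvAGo i j l k s = [] := by
  induction l with
  | nil => intro k s _; rfl
  | cons w t ih =>
      intro k s hk
      simp only [pvAGo]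
      rw [if_neg (by omega)]
      exact ih (k + 1) s (by omega)

theorem pvAGo_seen (i j : Int) (l : List String) : ∀ (k : Int), pvAGo i j l k true = [] := by
  induction l with
  | nil => intro k; rfl
  | cons w t ih =>
      intro k
      simp only [pvAGo]
      split
      · simp [ih (k + 1)]
      · exact ih (k + 1)

theorem pvAGo_eq (i j : Int) (l : List String) :
    ∀ (k : Int), pvAGo i j l k false = pvTws ((l.take (j - k + 1).toNat).drop (i - k).toNat) := by
  induction l with
  | nil => intro k; simp [pvAGo, pvTws]
  | cons w t ih =>
      intro k
      simp only [pvAGo]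
      by_cases hin : i ≤ k ∧ k ≤ j
      · rw [if_pos hin]
        have h1 : (j - k + 1).toNat = (j - (k + 1) + 1).toNat + 1 := by omega
        have h2 : (i - k).toNat = 0 := by omega
        have h3 : (i - (k + 1)).toNat = 0 := by omega
        rw [h1, h2]
        simp only [List.take_succ_cons, List.drop_zero]
        by_cases hs : w = "stop"
        · subst hs
          simp [pvAGo_seen, pvTws]
        · have hbe : (w == "stop") = false := beq_false_of_ne hs
          simp only [hbe, Bool.or_false]
          rw [if_neg (by simp [hbe])]
          simp only [List.singleton_append]
          rw [ih (k + 1), h3]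
          simp [pvTws, List.takeWhile_cons, hbe, hs]

      · rw [if_neg hin]
        by_cases hj : j < k
        · rw [pvAGo_past i j t (k + 1) false (by omega)]
          have : (j - k + 1).toNat = 0 := by omega
          simp [this, pvTws]
        · -- here k < i and k ≤ j
          have hki : k < i := by omega
          rw [ih (k + 1)]
          have h1 : (j - k + 1).toNat = (j - (k + 1) + 1).toNat + 1 := by omega
          have h2 : (i - k).toNat = (i - (k + 1)).toNat + 1 := by omega
          rw [h1, h2]
          simp [List.take_succ_cons]

theorem pvTake_index (xs : List String) :
    xs.take ((PySem.List.index? xs "stop").getD xs.length) = pvTws xs := by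
  induction xs with
  | nil => rfl
  | cons x t ih =>
      by_cases hx : x = "stop"
      · subst hx
        rw [PySem.List.index?_cons_self]
        simp [pvTws]
      · rw [PySem.List.index?_cons_of_ne t hx]
        cases h : PySem.List.index? t "stop" with
        | none =>
            simp only [h, Option.map_none, Option.getD_none, List.length_cons,
              List.take_succ_cons, pvTws, List.takeWhile_cons, beq_false_of_ne hx]
            simp only [h, Option.getD_none] at ih
            simp [ih, pvTws, hx]
        | some n =>
            simp only [h, Option.map_some, Option.getD_some, List.take_succ_cons, pvTws,
              List.takeWhile_cons, beq_false_of_ne hx]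
            simp only [h, Option.getD_some] at ih
            simp [ih, pvTws, hx]

-- ===== VERDICT (by name: the statement is the Claim_ definition above) =====
theorem getBetweenIndicesBeforeStop_spec : Claim_equal_getBetweenIndicesBeforeStop := by
  intro l i j _
  unfold Spec_getBetweenIndicesBeforeStop getBetweenIndicesBeforeStop getBetweenIndicesBeforeStop_alt
  rw [pvAGo_eq i j l 0]
  by_cases hj : j < 0
  · rw [if_pos hj, show (j - 0 + 1).toNat = 0 from by omega]
    simp [pvTws]
  · rw [if_neg hj, pvTake_index,
      PySem.List.slice_toNat l (a := max i 0) (b := j + 1) (by omega) (by omega)]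
    congr 1
    rw [List.drop_take,
      show (j - 0 + 1).toNat - (i - 0).toNat = (j + 1).toNat - (max i 0).toNat from by omega,
      show (i - 0).toNat = (max i 0).toNat from by omega]
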